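-- pv_equiv track=rewrite | github.com/lowresource-lang-eval/morphology_scripts | converters/esm_converter.py | normalize_glosses
-- ===== SOURCE A (Python) =====
-- def normalize_glosses(glosses, is_split_by_dots = True):
--     gloss_parts = glosses.split('-')
--     gloss_parts_normalized = []
--     for gloss_part in gloss_parts:
--         if is_split_by_dots:
--             for gloss_part_minor in gloss_part.split('.'):
--                 gloss_parts_normalized.append(gloss_part_minor)
--         else:
--             gloss_parts_normalized.append(gloss_part)
--     return gloss_parts_normalized
-- ===== SOURCE B (Python) =====
-- def normalize_glosses(glosses, is_split_by_dots=True):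
--     if is_split_by_dots:
--         return glosses.replace('.', '-').split('-')
--     return glosses.split('-')
-- ===== Notes on version B (the rewrite author's own statement) =====
-- stated objective: simpler
-- what changed: Replaces the nested loop with manual list appends by unifying the dot delimiter into a dash via str.replace and doing a single str.split.
import Mathlib
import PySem

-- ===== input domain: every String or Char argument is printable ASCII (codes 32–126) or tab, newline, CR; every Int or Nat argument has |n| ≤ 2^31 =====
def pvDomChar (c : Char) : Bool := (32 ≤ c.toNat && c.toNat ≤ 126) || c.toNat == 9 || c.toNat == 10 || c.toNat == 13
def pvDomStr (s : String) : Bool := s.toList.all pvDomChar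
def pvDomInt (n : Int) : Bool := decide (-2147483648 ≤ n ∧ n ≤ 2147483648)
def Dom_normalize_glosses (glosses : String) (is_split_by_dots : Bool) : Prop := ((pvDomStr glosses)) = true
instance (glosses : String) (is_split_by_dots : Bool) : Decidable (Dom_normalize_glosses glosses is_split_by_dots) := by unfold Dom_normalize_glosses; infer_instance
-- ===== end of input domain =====

-- B unifies the two delimiters: replace '.' by '-' and split once, instead of A's nested loop with manual appends (objective: simpler).

-- ===== PORT A =====
def normalize_glosses (glosses : String) (is_split_by_dots : Bool) : List String :=
  let gloss_parts := (PySem.Str.split? glosses "-").getD []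
  gloss_parts.foldl
    (fun acc gloss_part =>
      if is_split_by_dots then
        acc ++ ((PySem.Str.split? gloss_part ".").getD [])
      else
        acc ++ [gloss_part])
    []

-- ===== PORT B =====
def normalize_glosses_alt (glosses : String) (is_split_by_dots : Bool) : List String :=
  if is_split_by_dots then
    (PySem.Str.split? (PySem.Str.replace glosses "." "-") "-").getD []
  else
    (PySem.Str.split? glosses "-").getD []

-- ===== PRECONDITION & SPEC =====
def Spec_normalize_glosses (glosses : String) (is_split_by_dots : Bool) (out : List String) : Prop := out = normalize_glosses_alt glosses is_split_by_dots
instance (glosses : String) (is_split_by_dots : Bool) (out : List String) : Decidable (Spec_normalize_glosses glosses is_split_by_dots out) := by unfold Spec_normalize_glosses; infer_instance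

-- ===== CLAIM (what is proved, stated in full; the proofs are below) =====
def Claim_equal_normalize_glosses : Prop := ∀ (glosses : String) (is_split_by_dots : Bool), Dom_normalize_glosses glosses is_split_by_dots → Spec_normalize_glosses glosses is_split_by_dots (normalize_glosses glosses is_split_by_dots)

-- ===== LEMMAS AND PROOFS =====

/-- Clean structural recursion for Python's `s.split(d)` with a single-char separator. -/
def splitc (p : Char → Bool) : List Char → List (List Char)
  | [] => [[]]
  | c :: t => if p c then [] :: splitc p t else (splitc p t).modifyHead (c :: ·)

theorem splitc_ne_nil (p : Char → Bool) (l : List Char) : splitc p l ≠ [] := by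
  induction l with
  | nil => simp [splitc]
  | cons c t ih =>
    simp only [splitc]
    split_ifs
    · simp
    · cases h : splitc p t with
      | nil => exact absurd h ih
      | cons a b => simp


theorem splitOn_go_spec (d : Char) :
    ∀ (l : List Char) (fuel : Nat) (cur : List Char) (acc : List (List Char)),
      l.length < fuel →
      PySem.Chars.splitOn.go [d] fuel l cur acc =
        acc.reverse ++ (splitc (· == d) l).modifyHead (cur.reverse ++ ·) := by
  intro l
  induction l with
  | nil =>
    intro fuel cur acc h
    match fuel, h with
    | fuel + 1, _ => simp [PySem.Chars.splitOn.go, splitc]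
  | cons c t ih =>
    intro fuel cur acc h
    match fuel, h with
    | fuel + 1, h =>
      have ht : t.length < fuel := by simpa using h
      simp only [PySem.Chars.splitOn.go]
      by_cases hd : d = c
      · subst hd
        have hpre : [d].isPrefixOf (d :: t) = true := by simp [List.isPrefixOf]
        rw [if_pos hpre]
        simp only [List.length_nil, List.length_cons, Nat.zero_add, List.drop_succ_cons, List.drop_zero]
        rw [ih fuel [] (cur.reverse :: acc) ht]
        cases hsp : splitc (· == d) t with
        | nil => exact absurd hsp (splitc_ne_nil _ _)
        | cons x xs => simp [splitc, hsp]
      · have hpre : [d].isPrefixOf (c :: t) = false := by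
          simp [List.isPrefixOf]; exact hd
        rw [if_neg (by simp [hpre])]
        rw [ih fuel (c :: cur) acc ht]
        have hcd : (c == d) = false := by simp; exact fun hc => hd hc.symm
        simp only [splitc, hcd, if_neg (by simp : ¬ (false = true))]
        cases hsp : splitc (· == d) t with
        | nil => exact absurd hsp (splitc_ne_nil _ _)
        | cons a b => simp

theorem splitOn_single (d : Char) (l : List Char) :
    PySem.Chars.splitOn l [d] = splitc (· == d) l := by
  unfold PySem.Chars.splitOn
  rw [splitOn_go_spec d l (l.length + 1) [] [] (by omega)]
  cases h : splitc (· == d) l with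
  | nil => exact absurd h (splitc_ne_nil _ _)
  | cons a b => simp

theorem replace_go_spec (a b : Char) :
    ∀ (l : List Char) (fuel : Nat) (acc : List Char),
      l.length ≤ fuel →
      PySem.Chars.replace.go [a] [b] fuel l acc =
        acc.reverse ++ l.map (fun c => if c == a then b else c) := by
  intro l
  induction l with
  | nil =>
    intro fuel acc h
    cases fuel <;> simp [PySem.Chars.replace.go]
  | cons c t ih =>
    intro fuel acc h
    match fuel, h with
    | fuel + 1, h =>
      have ht : t.length ≤ fuel := by simpa using h
      simp only [PySem.Chars.replace.go]
      by_cases hd : a = c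
      · subst hd
        have hpre : [a].isPrefixOf (a :: t) = true := by simp [List.isPrefixOf]
        rw [if_pos hpre]
        simp only [List.length_nil, List.length_cons, List.drop_succ_cons, List.drop_zero]
        rw [ih fuel ([b].reverse ++ acc) ht]
        simp
      · have hpre : [a].isPrefixOf (c :: t) = false := by
          simp [List.isPrefixOf]; exact hd
        rw [if_neg (by simp [hpre])]
        rw [ih fuel (c :: acc) ht]
        rw [List.map_cons, if_neg (by simp; exact fun hc => hd hc.symm)]
        simp

theorem replace_single (a b : Char) (l : List Char) :
    PySem.Chars.replace l [a] [b] = l.map (fun c => if c == a then b else c) := by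
  unfold PySem.Chars.replace
  rw [if_neg (by simp)]
  rw [replace_go_spec a b l l.length [] (le_refl _)]
  simp

/-- Splitting on '-' after replacing '.' by '-' = splitting on '-' then on '.'. -/
theorem splitc_replace (l : List Char) :
    splitc (· == '-') (l.map (fun c => if c == '.' then '-' else c)) =
      (splitc (· == '-') l).flatMap (splitc (· == '.')) := by
  induction l with
  | nil => simp [splitc]
  | cons c t ih =>
    by_cases h1 : c = '.'
    · subst h1
      simp only [List.map_cons, if_pos (by rfl : ('.' == '.') = true)]
      simp only [splitc]
      rw [ih]
      cases hsp : splitc (· == '-') t with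
      | nil => exact absurd hsp (splitc_ne_nil _ _)
      | cons hd tl =>
        simp [splitc]
    · by_cases h2 : c = '-'
      · subst h2
        simp only [List.map_cons, if_neg (by decide : ¬ (('-' == '.') = true))]
        simp only [splitc]
        rw [ih]
        simp [splitc]
      · have hc1 : (c == '.') = false := by simp [h1]
        have hc2 : (c == '-') = false := by simp [h2]
        simp only [List.map_cons, hc1, if_neg (by simp : ¬ (false = true))]
        simp only [splitc, hc2, if_neg (by simp : ¬ (false = true))]
        rw [ih]
        cases hsp : splitc (· == '-') t with
        | nil => exact absurd hsp (splitc_ne_nil _ _)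
        | cons hd tl =>
          cases hsq : splitc (· == '.') hd with
          | nil => exact absurd hsq (splitc_ne_nil _ _)
          | cons qh qt => simp [splitc, hsq, hc1]

theorem split?_dash (s : String) :
    (PySem.Str.split? s "-").getD [] = (splitc (· == '-') s.toList).map String.ofList := by
  have h := PySem.Str.split?_map s "-"
  simp only [PySem.Chars.split?] at h
  rw [if_neg (by simp)] at h
  cases hs : PySem.Str.split? s "-" with
  | none => rw [hs] at h; simp at h
  | some v =>
    rw [hs] at h
    simp only [Option.map_some, Option.some.injEq] at h
    have : v.map (String.ofList ∘ String.toList) = (PySem.Chars.splitOn s.toList ['-']).map String.ofList := by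
      rw [← List.map_map, h]; rfl
    simp only [Option.getD_some]
    rw [show v = v.map (String.ofList ∘ String.toList) by simp [Function.comp_def], this, splitOn_single]

theorem split?_dot (s : String) :
    (PySem.Str.split? s ".").getD [] = (splitc (· == '.') s.toList).map String.ofList := by
  have h := PySem.Str.split?_map s "."
  simp only [PySem.Chars.split?] at h
  rw [if_neg (by simp)] at h
  cases hs : PySem.Str.split? s "." with
  | none => rw [hs] at h; simp at h
  | some v =>
    rw [hs] at h
    simp only [Option.map_some, Option.some.injEq] at h
    have : v.map (String.ofList ∘ String.toList) = (PySem.Chars.splitOn s.toList ['.']).map String.ofList := by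
      rw [← List.map_map, h]; rfl
    simp only [Option.getD_some]
    rw [show v = v.map (String.ofList ∘ String.toList) by simp [Function.comp_def], this, splitOn_single]

-- ===== VERDICT (by name: the statement is the Claim_ definition above) =====
theorem normalize_glosses_spec : Claim_equal_normalize_glosses := by
  intro glosses flag _
  unfold Spec_normalize_glosses normalize_glosses normalize_glosses_alt
  cases flag with
  | false =>
    simp only [Bool.false_eq_true, if_false]
    rw [PySem.List.foldl_append_eq_flatMap (fun p => [p])]
    simp
  | true =>
    simp only [if_true]
    rw [PySem.List.foldl_append_eq_flatMap (fun p => (PySem.Str.split? p ".").getD [])]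
    simp only [List.nil_append]
    rw [split?_dash]
    have hrep : (PySem.Str.replace glosses "." "-").toList =
        glosses.toList.map (fun c => if c == '.' then '-' else c) := by
      rw [PySem.Str.toList_replace]
      exact replace_single '.' '-' glosses.toList
    rw [split?_dash, hrep, splitc_replace]
    rw [List.flatMap_map, List.map_flatMap]
    congr 1
    funext chunk
    rw [split?_dot]
    simp
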